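-- pv_equiv track=rewrite | github.com/SoutoSebastian/LaboDeDatos | LaboDatosPy/ejs_clase.py | contar_ejemplares
-- ===== SOURCE A (Python) =====
-- def contar_ejemplares(lista_arboles):
--     res = {}
--
--     for i in range (len(lista_arboles)):
--         if(lista_arboles[i]['nombre_com'] not in res):
--             res[lista_arboles[i]['nombre_com']] = 1
--         else:
--             res[lista_arboles[i]['nombre_com']] += 1
--
--     return res
-- ===== SOURCE B (Python) =====
-- def contar_ejemplares(lista_arboles):
--     names = [a['nombre_com'] for a in lista_arboles]
--     return {n: names.count(n) for n in dict.fromkeys(names)}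
-- ===== Notes on version B (the rewrite author's own statement) =====
-- stated objective: simpler
-- what changed: Replaces the index loop with hash-counter increments by a first-occurrence dedup of the extracted name list plus a count() pass per distinct name, built as a dict comprehension.
import Mathlib
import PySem

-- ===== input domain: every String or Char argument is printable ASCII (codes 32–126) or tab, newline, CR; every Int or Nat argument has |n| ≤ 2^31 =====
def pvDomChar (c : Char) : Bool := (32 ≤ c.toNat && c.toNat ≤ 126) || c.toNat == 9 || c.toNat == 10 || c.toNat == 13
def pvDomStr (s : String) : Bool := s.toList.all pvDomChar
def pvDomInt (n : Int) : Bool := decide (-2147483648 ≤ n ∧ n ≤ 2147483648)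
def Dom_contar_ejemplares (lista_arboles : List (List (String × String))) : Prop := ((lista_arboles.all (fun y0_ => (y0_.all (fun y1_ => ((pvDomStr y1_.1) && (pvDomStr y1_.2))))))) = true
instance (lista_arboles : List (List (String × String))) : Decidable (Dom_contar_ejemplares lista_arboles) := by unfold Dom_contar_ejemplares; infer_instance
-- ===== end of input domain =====

-- ===== PORT A =====
-- B changes only the algorithm; return value proved equal on Pre_ (every tree dict has key 'nombre_com').
-- a['nombre_com']: Python dict lookup; total form getD, exact under Pre_ (missing key = KeyError, excluded)
def pvNombreCom (a : List (String × String)) : String :=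
  (PySem.Dict.mk a).getD "nombre_com" ""

def contar_ejemplares (lista_arboles : List (List (String × String))) : List (String × Int) :=
  let res : PySem.Dict String Int :=
    (PySem.List.pyRange 0 (PySem.List.len lista_arboles) 1).foldl
      (fun res i =>
        if !res.contains (pvNombreCom (PySem.List.pyGetD lista_arboles i [])) then
          res.insert (pvNombreCom (PySem.List.pyGetD lista_arboles i [])) 1
        else
          res.insert (pvNombreCom (PySem.List.pyGetD lista_arboles i []))
            (res.getD (pvNombreCom (PySem.List.pyGetD lista_arboles i [])) 0 + 1))
      PySem.Dict.empty
  res.items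

-- ===== PORT B =====
def contar_ejemplares_alt (lista_arboles : List (List (String × String))) : List (String × Int) :=
  let names := lista_arboles.map pvNombreCom
  (PySem.List.dedup names).map (fun n => (n, (names.count n : Int)))

-- ===== PRECONDITION & SPEC =====
-- exactly the inputs on which A returns: every tree dict must contain the key 'nombre_com' (else KeyError)
def Pre_contar_ejemplares (lista_arboles : List (List (String × String))) : Prop :=
  ∀ a ∈ lista_arboles, (PySem.Dict.mk a).contains "nombre_com" = true
instance (lista_arboles : List (List (String × String))) : Decidable (Pre_contar_ejemplares lista_arboles) := by unfold Pre_contar_ejemplares; infer_instance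

def pvWitness_contar_ejemplares : (List (List (String × String))) :=
  [[("nombre_com", "jacaranda")], [("nombre_com", "ceibo"), ("altura", "7")], [("nombre_com", "jacaranda")]]

def Spec_contar_ejemplares (lista_arboles : List (List (String × String))) (out : List (String × Int)) : Prop := out = contar_ejemplares_alt lista_arboles
instance (lista_arboles : List (List (String × String))) (out : List (String × Int)) : Decidable (Spec_contar_ejemplares lista_arboles out) := by unfold Spec_contar_ejemplares; infer_instance

-- ===== CLAIM (what is proved, stated in full; the proofs are below) =====
def Claim_equal_contar_ejemplares : Prop := ∀ (lista_arboles : List (List (String × String))), Dom_contar_ejemplares lista_arboles → Pre_contar_ejemplares lista_arboles → Spec_contar_ejemplares lista_arboles (contar_ejemplares lista_arboles)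

-- ===== LEMMAS AND PROOFS =====

-- A's two branches are one insert: when the key is absent its current count getD 0 is 0
theorem pvStep_eq (d : PySem.Dict String Int) (n : String) :
    (if !d.contains n then d.insert n 1 else d.insert n (d.getD n 0 + 1))
      = d.insert n (d.getD n 0 + 1) := by
  by_cases h : d.contains n = true
  · simp [h]
  · have h' : d.contains n = false := by simpa using h
    rw [PySem.Dict.getD_of_not_contains _ _ h']
    simp [h']

-- ===== VERDICT (by name: the statement is the Claim_ definition above) =====
theorem contar_ejemplares_spec : Claim_equal_contar_ejemplares := by
  intro lista _ _
  show ((PySem.List.pyRange 0 ((lista.length : Int)) 1).foldl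
      (fun res i =>
        if !res.contains (pvNombreCom (PySem.List.pyGetD lista i [])) then
          res.insert (pvNombreCom (PySem.List.pyGetD lista i [])) 1
        else
          res.insert (pvNombreCom (PySem.List.pyGetD lista i []))
            (res.getD (pvNombreCom (PySem.List.pyGetD lista i [])) 0 + 1))
      PySem.Dict.empty).items
    = (PySem.List.dedup (lista.map pvNombreCom)).map
        (fun n => (n, ((lista.map pvNombreCom).count n : Int)))
  have h1 := PySem.List.foldl_pyRange_pyGetD' (a := 0) lista []
      (fun (res : PySem.Dict String Int) a =>
        if !res.contains (pvNombreCom a) then res.insert (pvNombreCom a) 1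
        else res.insert (pvNombreCom a) (res.getD (pvNombreCom a) 0 + 1))
      PySem.Dict.empty (by omega)
  have h2 : ((PySem.List.pyRange 0 ((lista.length : Int)) 1).foldl
      (fun res i =>
        if !res.contains (pvNombreCom (PySem.List.pyGetD lista i [])) then
          res.insert (pvNombreCom (PySem.List.pyGetD lista i [])) 1
        else
          res.insert (pvNombreCom (PySem.List.pyGetD lista i []))
            (res.getD (pvNombreCom (PySem.List.pyGetD lista i [])) 0 + 1))
      PySem.Dict.empty)
      = PySem.Dict.counter (lista.map pvNombreCom) := by
    refine h1.trans ?_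
    simp only [Int.toNat_zero, List.drop_zero]
    have h3 : lista.foldl
        (fun res a => res.insert (pvNombreCom a) (res.getD (pvNombreCom a) 0 + 1))
        (PySem.Dict.empty : PySem.Dict String Int)
        = (lista.map pvNombreCom).foldl
            (fun d x => d.insert x (d.getD x 0 + 1)) PySem.Dict.empty :=
      by rw [List.foldl_map]
    rw [PySem.List.foldl_congr_mem lista _ _ _
      (fun acc x _ => pvStep_eq acc (pvNombreCom x)), h3]
    exact PySem.Dict.foldl_insert_getD_add_one_eq_counter _
  refine (congrArg PySem.Dict.items h2).trans ?_
  rw [PySem.Dict.items_counter, PySem.List.dedup_eq_ofList]
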